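-- pv_equiv track=rewrite | github.com/aaaeide/advent-of-code-2020 | d07.py | find_num_parents
-- ===== SOURCE A (Python) =====
-- from typing import Dict, Tuple
--
-- Dag = Dict[str, Dict[str, int]]
--
-- def find_num_parents(dag: Dag, goal: str) -> int:
--     memo: Dict[str, bool] = {}
--
--     def find_node(start: str) -> bool:
--         if start in memo:
--             return memo[start]
--
--         children = dag[start]
--         res = False
--
--         if goal in children:
--             res = True
--         else:
--             for child in children:
--                 if find_node(child):
--                     res = True
--
--         memo[start] = res
--         return res
--
--     parents_found = 0
--     for node in dag:
--         if find_node(node):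
--             parents_found += 1
--
--     return parents_found
-- ===== SOURCE B (Python) =====
-- def find_num_parents(dag, goal):
--     # Bottom-up fixpoint: repeatedly add every node with an edge to goal or to an
--     # already-known ancestor, until nothing changes; answer is the size of that set.
--     reaches = set()
--     while True:
--         new = {node for node, children in dag.items()
--                if node not in reaches
--                and (goal in children or any(c in reaches for c in children))}
--         if not new:
--             return len(reaches)
--         reaches |= new
-- ===== Notes on version B (the rewrite author's own statement) =====
-- stated objective: alternative
-- what changed: Replaces A's per-node memoized recursive DFS with a single bottom-up iterative fixpoint (Bellman-Ford-style closure): repeatedly add every node that has an edge to goal or to an already-found ancestor until nothing changes, then return the size of that set.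
import Mathlib
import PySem

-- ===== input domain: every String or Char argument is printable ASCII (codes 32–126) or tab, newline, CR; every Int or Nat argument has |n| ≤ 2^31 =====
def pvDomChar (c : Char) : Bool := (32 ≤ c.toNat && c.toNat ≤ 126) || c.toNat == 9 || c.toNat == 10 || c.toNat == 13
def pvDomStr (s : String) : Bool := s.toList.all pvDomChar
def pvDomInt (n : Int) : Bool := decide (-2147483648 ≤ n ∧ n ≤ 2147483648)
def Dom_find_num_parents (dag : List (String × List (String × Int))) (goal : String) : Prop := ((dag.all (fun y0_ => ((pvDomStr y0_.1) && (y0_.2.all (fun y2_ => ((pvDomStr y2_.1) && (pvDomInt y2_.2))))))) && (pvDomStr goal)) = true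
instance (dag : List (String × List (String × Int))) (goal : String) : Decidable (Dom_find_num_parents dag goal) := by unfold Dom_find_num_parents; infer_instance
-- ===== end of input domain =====

-- B replaces A's per-node memoized recursive DFS by a bottom-up iterative fixpoint
-- (repeatedly add every node with an edge to goal or to a known ancestor); same count.

-- ===== PORT A =====
-- keys of a child dict (Python: iterating / membership on a dict sees its keys)
def pvCK (ch : List (String × Int)) : List String := ch.map Prod.fst

-- find_node with memo threaded through; fuel models Python's recursion stack
-- (none = KeyError on dag[start] or RecursionError; both are excluded by Pre_)
def pvFindNode (dag : List (String × List (String × Int))) (goal : String) :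
    Nat → PySem.Dict String Bool → String → Option (PySem.Dict String Bool × Bool)
  | 0, _, _ => none
  | fuel+1, memo, start =>
    match PySem.Dict.get? memo start with
    | some b => some (memo, b)
    | none =>
      match PySem.Dict.get? (PySem.Dict.mk dag) start with
      | none => none
      | some children =>
        if goal ∈ pvCK children then
          some (PySem.Dict.insert memo start true, true)
        else
          match (pvCK children).foldl (fun acc c =>
              match acc with
              | none => none
              | some mr =>
                match pvFindNode dag goal fuel mr.1 c with
                | none => none
                | some m'b => some (m'b.1, mr.2 || m'b.2)) (some (memo, false)) with
          | none => none
          | some mres => some (PySem.Dict.insert mres.1 start mres.2, mres.2)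

-- one step of the 'for node in dag' counting loop
def pvTopStep (dag : List (String × List (String × Int))) (goal : String)
    (acc : Option (PySem.Dict String Bool × Int)) (node : String × List (String × Int)) :
    Option (PySem.Dict String Bool × Int) :=
  match acc with
  | none => none
  | some mn =>
    match pvFindNode dag goal (dag.length + 1) mn.1 node.1 with
    | none => none
    | some m'b => some (m'b.1, if m'b.2 then mn.2 + 1 else mn.2)

def find_num_parents (dag : List (String × List (String × Int))) (goal : String) : Int :=
  match dag.foldl (pvTopStep dag goal) (some ((PySem.Dict.empty : PySem.Dict String Bool), (0 : Int))) with
  | none => 0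
  | some mn => mn.2

-- ===== PORT B =====
-- the set comprehension: nodes not yet known that have an edge to goal or into `reaches`
def pvNewNodes (dag : List (String × List (String × Int))) (goal : String)
    (reaches : PySem.Set String) : PySem.Set String :=
  PySem.Set.ofList ((dag.filter (fun p =>
    !decide (p.1 ∈ reaches) &&
      (decide (goal ∈ pvCK p.2) || (pvCK p.2).any (fun c => decide (c ∈ reaches))))).map Prod.fst)

-- the 'while True' loop; fuel dag.length+1 bounds its iterations (each round adds a node)
def pvLoopB (dag : List (String × List (String × Int))) (goal : String) :
    Nat → PySem.Set String → Int
  | 0, reaches => PySem.Set.len reaches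
  | fuel+1, reaches =>
    let nw := pvNewNodes dag goal reaches
    if nw = [] then PySem.Set.len reaches
    else pvLoopB dag goal fuel (PySem.Set.union reaches nw)

def find_num_parents_alt (dag : List (String × List (String × Int))) (goal : String) : Int :=
  pvLoopB dag goal (dag.length + 1) PySem.Set.empty

-- ===== PRECONDITION & SPEC =====
def pvKeys (dag : List (String × List (String × Int))) : List String := dag.map Prod.fst

-- nodes whose children do not contain goal (only these are expanded recursively by A)
def pvEKeys (dag : List (String × List (String × Int))) (goal : String) : List String :=
  (dag.filter (fun p => !decide (goal ∈ pvCK p.2))).map Prod.fst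

-- successors followed by A's recursion from a node
def pvSuccE (dag : List (String × List (String × Int))) (goal : String) (a : String) : List String :=
  match PySem.Dict.get? (PySem.Dict.mk dag) a with
  | none => []
  | some ch => if goal ∈ pvCK ch then [] else pvCK ch

def pvENew (dag : List (String × List (String × Int))) (goal : String) (s : List String) : List String :=
  (PySem.List.dedup (s.flatMap (pvSuccE dag goal))).filter (fun x => !decide (x ∈ s))

def pvESat (dag : List (String × List (String × Int))) (goal : String) : Nat → List String → List String
  | 0, s => s
  | f+1, s => if pvENew dag goal s = [] then s else pvESat dag goal f (s ++ pvENew dag goal s)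

def pvUniv (dag : List (String × List (String × Int))) : List String :=
  PySem.List.dedup (dag.flatMap (fun p => pvCK p.2))

-- all nodes reachable from k in ≥ 1 step along recursively-expanded edges
def pvEReach (dag : List (String × List (String × Int))) (goal : String) (k : String) : List String :=
  pvESat dag goal ((pvUniv dag).length + 1) (PySem.List.dedup (pvSuccE dag goal k))

-- Pre_ excludes: duplicate outer keys (impossible for a Python dict, and A's dict semantics
-- would be accidental on them); nodes whose recursion reaches a child that is not a key of
-- dag (A raises KeyError there); and cycles among recursively-expanded nodes (A raises
-- RecursionError there).
def Pre_find_num_parents (dag : List (String × List (String × Int))) (goal : String) : Prop :=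
  (pvKeys dag).Nodup ∧
  (∀ p ∈ dag, goal ∈ pvCK p.2 ∨ ∀ c ∈ pvCK p.2, c ∈ pvKeys dag) ∧
  (∀ k ∈ pvEKeys dag goal, k ∉ pvEReach dag goal k)
instance (dag : List (String × List (String × Int))) (goal : String) : Decidable (Pre_find_num_parents dag goal) := by unfold Pre_find_num_parents; infer_instance

def pvWitness_find_num_parents : (List (String × List (String × Int))) × String :=
  ([("a", [("b", 1)]), ("b", [])], "b")

def Spec_find_num_parents (dag : List (String × List (String × Int))) (goal : String) (out : Int) : Prop := out = find_num_parents_alt dag goal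
instance (dag : List (String × List (String × Int))) (goal : String) (out : Int) : Decidable (Spec_find_num_parents dag goal out) := by unfold Spec_find_num_parents; infer_instance

-- ===== CLAIM (what is proved, stated in full; the proofs are below) =====
def Claim_equal_find_num_parents : Prop := ∀ (dag : List (String × List (String × Int))) (goal : String), Dom_find_num_parents dag goal → Pre_find_num_parents dag goal → Spec_find_num_parents dag goal (find_num_parents dag goal)

-- ===== LEMMAS AND PROOFS =====

-- "u has a path of ≥ 1 edges to goal through the dict" — what A's find_node decides
inductive pvReach (dag : List (String × List (String × Int))) (goal : String) : String → Prop
  | direct (k : String) (ch : List (String × Int))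
      (h : PySem.Dict.get? (PySem.Dict.mk dag) k = some ch) (hg : goal ∈ pvCK ch) :
      pvReach dag goal k
  | step (k : String) (ch : List (String × Int)) (c : String)
      (h : PySem.Dict.get? (PySem.Dict.mk dag) k = some ch) (hc : c ∈ pvCK ch)
      (hr : pvReach dag goal c) : pvReach dag goal k

def pvEdgeE (dag : List (String × List (String × Int))) (goal : String) (a b : String) : Prop :=
  b ∈ pvSuccE dag goal a

def pvReachE (dag : List (String × List (String × Int))) (goal : String) : String → String → Prop :=
  Relation.TransGen (pvEdgeE dag goal)

def pvInv (dag : List (String × List (String × Int))) (goal : String)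
    (memo : PySem.Dict String Bool) : Prop :=
  ∀ x b, memo.get? x = some b → (b = true ↔ pvReach dag goal x)

lemma pv_get?_mem {dag : List (String × List (String × Int))} {s : String} {ch : List (String × Int)}
    (h : PySem.Dict.get? (PySem.Dict.mk dag) s = some ch) : (s, ch) ∈ dag :=
  PySem.Dict.mem_items_of_get?_eq_some _ h

lemma pv_mem_keys_get? {dag : List (String × List (String × Int))} {s : String}
    (h : s ∈ pvKeys dag) : ∃ ch, PySem.Dict.get? (PySem.Dict.mk dag) s = some ch := by
  cases hg : PySem.Dict.get? (PySem.Dict.mk dag) s with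
  | none =>
    exact absurd h (by simpa [pvKeys, PySem.Dict.keys_mk] using
      (PySem.Dict.get?_eq_none_iff_not_mem_keys _ _).mp hg)
  | some ch => exact ⟨ch, rfl⟩

lemma pv_get?_keys_mem {dag : List (String × List (String × Int))} {s : String} {ch}
    (h : PySem.Dict.get? (PySem.Dict.mk dag) s = some ch) : s ∈ pvKeys dag := by
  have := pv_get?_mem h
  exact List.mem_map.mpr ⟨(s, ch), this, rfl⟩

lemma pv_reach_iff {dag : List (String × List (String × Int))} {goal s ch}
    (h : PySem.Dict.get? (PySem.Dict.mk dag) s = some ch) :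
    pvReach dag goal s ↔ (goal ∈ pvCK ch ∨ ∃ c ∈ pvCK ch, pvReach dag goal c) := by
  constructor
  · intro hr
    cases hr with
    | direct k ch' h' hg => rw [h] at h'; cases h'; exact Or.inl hg
    | step k ch' c h' hc hr => rw [h] at h'; cases h'; exact Or.inr ⟨c, hc, hr⟩
  · rintro (hg | ⟨c, hc, hr⟩)
    · exact pvReach.direct s ch h hg
    · exact pvReach.step s ch c h hc hr

lemma pv_reach_mem_keys {dag : List (String × List (String × Int))} {goal k}
    (h : pvReach dag goal k) : k ∈ pvKeys dag := by
  cases h with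
  | direct k ch hg _ => exact pv_get?_keys_mem hg
  | step k ch c hg _ _ => exact pv_get?_keys_mem hg

-- ---------- A: soundness of the memoized DFS ----------

lemma pv_foldl_none (dag : List (String × List (String × Int))) (goal : String) (fuel : Nat)
    (cs : List String) :
    cs.foldl (fun acc c =>
      match acc with
      | none => none
      | some mr =>
        match pvFindNode dag goal fuel mr.1 c with
        | none => none
        | some m'b => some (m'b.1, mr.2 || m'b.2)) none = none := by
  induction cs with
  | nil => rfl
  | cons c cs ih => simpa using ih

lemma pv_loop_sound {dag : List (String × List (String × Int))} {goal : String} {fuel : Nat}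
    (H : ∀ memo s out, pvInv dag goal memo → pvFindNode dag goal fuel memo s = some out →
      pvInv dag goal out.1 ∧ (out.2 = true ↔ pvReach dag goal s)) :
    ∀ (cs : List String) (memo : PySem.Dict String Bool) (r : Bool) out,
      pvInv dag goal memo →
      cs.foldl (fun acc c =>
        match acc with
        | none => none
        | some mr =>
          match pvFindNode dag goal fuel mr.1 c with
          | none => none
          | some m'b => some (m'b.1, mr.2 || m'b.2)) (some (memo, r)) = some out →
      pvInv dag goal out.1 ∧ (out.2 = true ↔ (r = true ∨ ∃ c ∈ cs, pvReach dag goal c)) := by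
  intro cs
  induction cs with
  | nil =>
    intro memo r out hinv heq
    simp only [List.foldl_nil, Option.some.injEq] at heq
    subst heq
    simp [hinv]
  | cons c cs ih =>
    intro memo r out hinv heq
    rw [List.foldl_cons] at heq
    cases hc : pvFindNode dag goal fuel memo c with
    | none =>
      simp only [hc] at heq
      rw [pv_foldl_none] at heq
      exact absurd heq (by simp)
    | some m'b =>
      simp only [hc] at heq
      obtain ⟨hinv', hiff⟩ := H memo c m'b hinv hc
      obtain ⟨hinv'', hiff'⟩ := ih m'b.1 (r || m'b.2) out hinv' heq
      refine ⟨hinv'', ?_⟩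
      rw [hiff']
      simp only [Bool.or_eq_true, List.mem_cons]
      constructor
      · rintro (⟨hr | hb⟩ | ⟨c', hc', hrc⟩)
        · exact Or.inl hr
        · exact Or.inr ⟨c, Or.inl rfl, hiff.mp hb⟩
        · exact Or.inr ⟨c', Or.inr hc', hrc⟩
      · rintro (hr | ⟨c', hc' | hc', hrc⟩)
        · exact Or.inl (Or.inl hr)
        · exact Or.inl (Or.inr (hiff.mpr (hc' ▸ hrc)))
        · exact Or.inr ⟨c', hc', hrc⟩

lemma pv_findNode_sound {dag : List (String × List (String × Int))} {goal : String} :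
    ∀ (fuel : Nat) (memo : PySem.Dict String Bool) (s : String) out,
      pvInv dag goal memo → pvFindNode dag goal fuel memo s = some out →
      pvInv dag goal out.1 ∧ (out.2 = true ↔ pvReach dag goal s) := by
  intro fuel
  induction fuel with
  | zero =>
    intro memo s out _ heq
    exact absurd heq (by simp [pvFindNode])
  | succ fuel ih =>
    intro memo s out hinv heq
    rw [pvFindNode] at heq
    split at heq
    · rename_i b hm
      simp only [Option.some.injEq] at heq
      subst heq
      exact ⟨hinv, hinv s b hm⟩
    · rename_i hm
      split at heq
      · exact absurd heq (by simp)
      · rename_i ch hg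
        split at heq
        · rename_i hgl
          simp only [Option.some.injEq] at heq
          subst heq
          have hrs : pvReach dag goal s := pvReach.direct s ch hg hgl
          refine ⟨?_, by simp [hrs]⟩
          intro x b hx
          rw [PySem.Dict.get?_insert] at hx
          split at hx
          · rename_i hxs
            subst hxs
            simp only [Option.some.injEq] at hx
            subst hx
            simp [hrs]
          · exact hinv x b hx
        · rename_i hgl
          split at heq
          · exact absurd heq (by simp)
          · rename_i mres hfold
            simp only [Option.some.injEq] at heq
            subst heq
            obtain ⟨hinv', hiff⟩ := pv_loop_sound ih (pvCK ch) memo false mres hinv hfold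
            simp only [Bool.false_eq_true, false_or] at hiff
            have hrs : mres.2 = true ↔ pvReach dag goal s := by
              rw [hiff, pv_reach_iff hg]
              constructor
              · exact Or.inr
              · rintro (hgc | hx)
                · exact absurd hgc hgl
                · exact hx
            refine ⟨?_, hrs⟩
            intro x b hx
            rw [PySem.Dict.get?_insert] at hx
            split at hx
            · rename_i hxs
              subst hxs
              simp only [Option.some.injEq] at hx
              subst hx
              exact hrs
            · exact hinv' x b hx

-- ---------- acyclicity check is sound ----------

lemma pv_esat_mono {dag goal} : ∀ (f : Nat) (s : List String), s ⊆ pvESat dag goal f s := by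
  intro f
  induction f with
  | zero => intro s x hx; exact hx
  | succ f ih =>
    intro s x hx
    unfold pvESat
    split
    · exact hx
    · exact ih _ (List.mem_append_left _ hx)

lemma pv_enew_closed {dag goal} {R : List String} (h : pvENew dag goal R = []) :
    ∀ a ∈ R, pvSuccE dag goal a ⊆ R := by
  intro a ha b hb
  by_contra hbR
  have hfl : b ∈ R.flatMap (pvSuccE dag goal) := List.mem_flatMap.mpr ⟨a, ha, hb⟩
  have hd : b ∈ PySem.List.dedup (R.flatMap (pvSuccE dag goal)) :=
    (PySem.List.mem_dedup _ _).mpr hfl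
  have : b ∈ pvENew dag goal R := by
    unfold pvENew
    exact List.mem_filter.mpr ⟨hd, by simp [hbR]⟩
  rw [h] at this
  exact absurd this (List.not_mem_nil)

lemma pv_succE_sub_univ {dag : List (String × List (String × Int))} {goal a} :
    pvSuccE dag goal a ⊆ pvUniv dag := by
  intro b hb
  unfold pvSuccE at hb
  split at hb
  · exact absurd hb (List.not_mem_nil)
  · rename_i ch hg
    split at hb
    · exact absurd hb (List.not_mem_nil)
    · unfold pvUniv
      exact (PySem.List.mem_dedup _ _).mpr
        (List.mem_flatMap.mpr ⟨(a, ch), pv_get?_mem hg, hb⟩)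

lemma pv_enew_disj {dag goal s} : ∀ x ∈ pvENew dag goal s, x ∉ s := by
  intro x hx
  unfold pvENew at hx
  have := (List.mem_filter.mp hx).2
  simpa using this

lemma pv_enew_nodup {dag goal s} : (pvENew dag goal s).Nodup := by
  unfold pvENew
  exact (PySem.List.nodup_dedup _).filter _

lemma pv_enew_sub_univ {dag goal s} : ∀ x ∈ pvENew dag goal s, x ∈ pvUniv dag := by
  intro x hx
  unfold pvENew at hx
  have h1 := (List.mem_filter.mp hx).1
  have h2 := (PySem.List.mem_dedup _ _).mp h1
  obtain ⟨a, _, hxa⟩ := List.mem_flatMap.mp h2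
  exact pv_succE_sub_univ hxa

lemma pv_esat_fix {dag goal} : ∀ (f : Nat) (s : List String), s.Nodup → s ⊆ pvUniv dag →
    (pvUniv dag).length + 1 - s.length ≤ f → pvENew dag goal (pvESat dag goal f s) = [] := by
  intro f
  induction f with
  | zero =>
    intro s hnd hsub hle
    have := (List.subperm_of_subset hnd hsub).length_le
    omega
  | succ f ih =>
    intro s hnd hsub hle
    unfold pvESat
    by_cases h : pvENew dag goal s = []
    · rw [if_pos h]; exact h
    · rw [if_neg h]
      have hdisj : List.Disjoint s (pvENew dag goal s) := by
        intro x hxs hxn; exact pv_enew_disj x hxn hxs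
      have hnd' : (s ++ pvENew dag goal s).Nodup :=
        List.Nodup.append hnd pv_enew_nodup hdisj
      have hsub' : (s ++ pvENew dag goal s) ⊆ pvUniv dag := by
        intro x hx
        rcases List.mem_append.mp hx with h1 | h2
        · exact hsub h1
        · exact pv_enew_sub_univ x h2
      have hpos : 0 < (pvENew dag goal s).length := List.length_pos_iff.mpr h
      apply ih _ hnd' hsub'
      rw [List.length_append]
      omega

lemma pv_reachE_mem {dag goal k x} (h : pvReachE dag goal k x) : x ∈ pvEReach dag goal k := by
  unfold pvEReach
  set s0 := PySem.List.dedup (pvSuccE dag goal k) with hs0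
  set R := pvESat dag goal ((pvUniv dag).length + 1) s0 with hR
  have hs0nd : s0.Nodup := PySem.List.nodup_dedup _
  have hs0sub : s0 ⊆ pvUniv dag := by
    intro y hy
    exact pv_succE_sub_univ ((PySem.List.mem_dedup _ _).mp hy)
  have hfix : pvENew dag goal R = [] :=
    pv_esat_fix _ s0 hs0nd hs0sub (by omega)
  have hclosed := pv_enew_closed hfix
  have hbase : pvSuccE dag goal k ⊆ R := by
    intro y hy
    exact pv_esat_mono _ _ ((PySem.List.mem_dedup _ _).mpr hy)
  induction h with
  | single he => exact hbase he
  | tail _ he ih => exact hclosed _ ih he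

lemma pv_edgeE_mem_ekeys {dag goal a b} (h : pvEdgeE dag goal a b) : a ∈ pvEKeys dag goal := by
  unfold pvEdgeE pvSuccE at h
  split at h
  · exact absurd h (List.not_mem_nil)
  · rename_i ch hg
    split at h
    · exact absurd h (List.not_mem_nil)
    · rename_i hgl
      unfold pvEKeys
      exact List.mem_map.mpr ⟨(a, ch), List.mem_filter.mpr ⟨pv_get?_mem hg, by simp [hgl]⟩, rfl⟩

lemma pv_acyc {dag goal} (hac : ∀ k ∈ pvEKeys dag goal, k ∉ pvEReach dag goal k) :
    ∀ s, ¬ pvReachE dag goal s s := by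
  intro s hs
  have hhead : ∀ {a b : String}, pvReachE dag goal a b → ∃ c, pvEdgeE dag goal a c := by
    intro a b h
    induction h with
    | single he => exact ⟨_, he⟩
    | tail _ _ ih => exact ih
  obtain ⟨c, he⟩ := hhead hs
  exact hac s (pv_edgeE_mem_ekeys he) (pv_reachE_mem hs)

-- ---------- A: totality under Pre_ ----------

lemma pv_loop_total {dag : List (String × List (String × Int))} {goal : String} {fuel : Nat}
    (H : ∀ c ∈ (cs : List String), ∀ memo : PySem.Dict String Bool,
      ∃ out, pvFindNode dag goal fuel memo c = some out) :
    ∀ (memo : PySem.Dict String Bool) (r : Bool),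
      ∃ out, cs.foldl (fun acc c =>
        match acc with
        | none => none
        | some mr =>
          match pvFindNode dag goal fuel mr.1 c with
          | none => none
          | some m'b => some (m'b.1, mr.2 || m'b.2)) (some (memo, r)) = some out := by
  induction cs with
  | nil => exact fun memo r => ⟨(memo, r), rfl⟩
  | cons c cs ih =>
    intro memo r
    obtain ⟨out1, h1⟩ := H c List.mem_cons_self memo
    rw [List.foldl_cons]
    simp only [h1]
    exact ih (fun c' hc' => H c' (List.mem_cons_of_mem _ hc')) out1.1 (r || out1.2)

lemma pv_findNode_total {dag : List (String × List (String × Int))} {goal : String}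
    (hpre : Pre_find_num_parents dag goal) :
    ∀ (fuel : Nat) (P : List String),
      ((pvEKeys dag goal).filter (fun x => !decide (x ∈ P))).length < fuel →
      ∀ (memo : PySem.Dict String Bool) (s : String), s ∈ pvKeys dag →
      (∀ p ∈ P, pvReachE dag goal p s) →
      ∃ out, pvFindNode dag goal fuel memo s = some out := by
  obtain ⟨hn, hclo, hac⟩ := hpre
  intro fuel
  induction fuel with
  | zero => intro P hmeas; omega
  | succ fuel ih =>
    intro P hmeas memo s hs hP
    cases hm : PySem.Dict.get? memo s with
    | some b => exact ⟨(memo, b), by simp [pvFindNode, hm]⟩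
    | none =>
      obtain ⟨ch, hg⟩ := pv_mem_keys_get? hs
      by_cases hgl : goal ∈ pvCK ch
      · exact ⟨(memo.insert s true, true), by simp [pvFindNode, hm, hg, hgl]⟩
      · -- s is an expanded node; every child is a key and is recursed into
        have hsE : s ∈ pvEKeys dag goal :=
          List.mem_map.mpr ⟨(s, ch), List.mem_filter.mpr ⟨pv_get?_mem hg, by simp [hgl]⟩, rfl⟩
        have hsP : s ∉ P := by
          intro hsP
          exact pv_acyc hac s (hP s hsP)
        have hcsub : ∀ c ∈ pvCK ch, c ∈ pvKeys dag := by
          rcases hclo (s, ch) (pv_get?_mem hg) with h | h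
          · exact absurd h hgl
          · exact h
        have hedge : ∀ c ∈ pvCK ch, pvEdgeE dag goal s c := by
          intro c hc
          unfold pvEdgeE pvSuccE
          simp only [hg, if_neg hgl]
          exact hc
        -- the measure strictly decreases for P' = s :: P
        have hmeas' : ((pvEKeys dag goal).filter (fun x => !decide (x ∈ s :: P))).length < fuel := by
          have h1 : (pvEKeys dag goal).filter (fun x => !decide (x ∈ s :: P))
              = ((pvEKeys dag goal).filter (fun x => !decide (x ∈ P))).filter
                  (fun x => !decide (x = s)) := by
            rw [List.filter_filter]
            apply List.filter_congr
            intro x _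
            by_cases h1 : x = s <;> by_cases h2 : x ∈ P <;> simp [h1, h2]
          have h2 : (((pvEKeys dag goal).filter (fun x => !decide (x ∈ P))).filter
              (fun x => !decide (x = s))).length
              < ((pvEKeys dag goal).filter (fun x => !decide (x ∈ P))).length := by
            apply List.length_filter_lt_length_iff_exists.mpr
            exact ⟨s, List.mem_filter.mpr ⟨hsE, by simp [hsP]⟩, by simp⟩
          rw [h1]
          omega
        have hchild : ∀ c ∈ pvCK ch, ∀ memo' : PySem.Dict String Bool,
            ∃ out, pvFindNode dag goal fuel memo' c = some out := by
          intro c hc memo'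
          apply ih (s :: P) hmeas' memo' c (hcsub c hc)
          intro p hp
          rcases List.mem_cons.mp hp with rfl | hpP
          · exact Relation.TransGen.single (hedge c hc)
          · exact Relation.TransGen.tail (hP p hpP) (hedge c hc)
        obtain ⟨fout, hfold⟩ := pv_loop_total hchild memo false
        exact ⟨(fout.1.insert s fout.2, fout.2), by simp [pvFindNode, hm, hg, hgl, hfold]⟩

-- ---------- B: the fixpoint set ----------

def pvBSet (dag : List (String × List (String × Int))) (goal : String) :
    Nat → PySem.Set String → PySem.Set String
  | 0, s => s
  | f+1, s =>
    if pvNewNodes dag goal s = [] then s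
    else pvBSet dag goal f (PySem.Set.union s (pvNewNodes dag goal s))

lemma pv_loopB_eq_bset {dag goal} : ∀ (f : Nat) (s : PySem.Set String),
    pvLoopB dag goal f s = ((pvBSet dag goal f s).length : Int) := by
  intro f
  induction f with
  | zero => intro s; rfl
  | succ f ih =>
    intro s
    unfold pvLoopB pvBSet
    by_cases h : pvNewNodes dag goal s = []
    · simp only [h]; rfl
    · simp only [if_neg h]
      exact ih _

lemma pv_mem_newNodes {dag goal s x} :
    x ∈ pvNewNodes dag goal s ↔
      ∃ ch, (x, ch) ∈ dag ∧ x ∉ s ∧ (goal ∈ pvCK ch ∨ ∃ c ∈ pvCK ch, c ∈ s) := by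
  unfold pvNewNodes
  rw [PySem.Set.mem_ofList]
  simp only [List.mem_map, List.mem_filter, Bool.and_eq_true, Bool.not_eq_true',
    decide_eq_false_iff_not, Bool.or_eq_true, decide_eq_true_eq, List.any_eq_true]
  constructor
  · rintro ⟨p, ⟨hp, hns, hcond⟩, rfl⟩
    exact ⟨p.2, hp, hns, by tauto⟩
  · rintro ⟨ch, hp, hns, hcond⟩
    exact ⟨(x, ch), ⟨hp, hns, by tauto⟩, rfl⟩

lemma pv_union_append : ∀ {t s : PySem.Set String}, t.Nodup → (∀ x ∈ t, x ∉ s) →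
    PySem.Set.union s t = s ++ t := by
  intro t
  induction t with
  | nil => intro s _ _; simp [PySem.Set.union]
  | cons x t ih =>
    intro s ht hd
    show (x :: t).foldl PySem.Set.add s = s ++ x :: t
    rw [List.foldl_cons, PySem.Set.add_of_not_mem (hd x (List.mem_cons_self))]
    have : t.foldl PySem.Set.add (s ++ [x]) = (s ++ [x]) ++ t := by
      apply ih ht.of_cons
      intro y hy hmem
      rcases List.mem_append.mp hmem with h1 | h2
      · exact hd y (List.mem_cons_of_mem _ hy) h1
      · have : y = x := by simpa using h2
        exact (List.nodup_cons.mp ht).1 (this ▸ hy)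
    rw [this]
    simp

lemma pv_new_nodup {dag goal s} : (pvNewNodes dag goal s).Nodup := PySem.Set.nodup_ofList _

lemma pv_new_disj {dag goal s} : ∀ x ∈ pvNewNodes dag goal s, x ∉ s := by
  intro x hx
  exact (pv_mem_newNodes.mp hx).choose_spec.2.1

lemma pv_new_sub_keys {dag goal s} : ∀ x ∈ pvNewNodes dag goal s, x ∈ pvKeys dag := by
  intro x hx
  obtain ⟨ch, hm, _, _⟩ := pv_mem_newNodes.mp hx
  exact List.mem_map.mpr ⟨(x, ch), hm, rfl⟩

lemma pv_new_reach {dag goal s} (hn : (pvKeys dag).Nodup)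
    (hsound : ∀ x ∈ s, pvReach dag goal x) :
    ∀ x ∈ pvNewNodes dag goal s, pvReach dag goal x := by
  intro x hx
  obtain ⟨ch, hm, _, hcond⟩ := pv_mem_newNodes.mp hx
  have hget : PySem.Dict.get? (PySem.Dict.mk dag) x = some ch := by
    apply (PySem.Dict.get?_eq_some_iff_mem_items _ _ _ ?_).mpr hm
    simpa [PySem.Dict.keys_mk] using hn
  rcases hcond with hg | ⟨c, hc, hcs⟩
  · exact pvReach.direct x ch hget hg
  · exact pvReach.step x ch c hget hc (hsound c hcs)

lemma pv_bset_union_append {dag goal} {s : PySem.Set String} :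
    PySem.Set.union s (pvNewNodes dag goal s) = s ++ pvNewNodes dag goal s :=
  pv_union_append pv_new_nodup pv_new_disj

lemma pv_bset_props {dag goal} (hn : (pvKeys dag).Nodup) :
    ∀ (f : Nat) (s : PySem.Set String), s.Nodup → s ⊆ pvKeys dag →
      (∀ x ∈ s, pvReach dag goal x) →
      (pvBSet dag goal f s).Nodup ∧ s ⊆ pvBSet dag goal f s ∧
        pvBSet dag goal f s ⊆ pvKeys dag ∧ (∀ x ∈ pvBSet dag goal f s, pvReach dag goal x) := by
  intro f
  induction f with
  | zero =>
    intro s hs hsub hsound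
    exact ⟨hs, fun x hx => hx, hsub, hsound⟩
  | succ f ih =>
    intro s hs hsub hsound
    unfold pvBSet
    by_cases h : pvNewNodes dag goal s = []
    · rw [if_pos h]
      exact ⟨hs, fun x hx => hx, hsub, hsound⟩
    · rw [if_neg h, pv_bset_union_append]
      have hdisj : List.Disjoint s (pvNewNodes dag goal s) :=
        fun {x} hxs hxn => pv_new_disj x hxn hxs
      have hs' : (s ++ pvNewNodes dag goal s).Nodup :=
        List.Nodup.append hs pv_new_nodup hdisj
      have hsub' : (s ++ pvNewNodes dag goal s) ⊆ pvKeys dag := by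
        intro x hx
        rcases List.mem_append.mp hx with h1 | h2
        · exact hsub h1
        · exact pv_new_sub_keys x h2
      have hsound' : ∀ x ∈ s ++ pvNewNodes dag goal s, pvReach dag goal x := by
        intro x hx
        rcases List.mem_append.mp hx with h1 | h2
        · exact hsound x h1
        · exact pv_new_reach hn hsound x h2
      obtain ⟨a, b, c, d⟩ := ih _ hs' hsub' hsound'
      exact ⟨a, fun x hx => b (List.mem_append_left _ hx), c, d⟩

lemma pv_bset_fix {dag goal} :
    ∀ (f : Nat) (s : PySem.Set String), s.Nodup → s ⊆ pvKeys dag →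
      dag.length + 1 - s.length ≤ f → pvNewNodes dag goal (pvBSet dag goal f s) = [] := by
  intro f
  induction f with
  | zero =>
    intro s hs hsub hle
    have h1 : s.length ≤ (pvKeys dag).length := (List.subperm_of_subset hs hsub).length_le
    have h2 : (pvKeys dag).length = dag.length := List.length_map _
    omega
  | succ f ih =>
    intro s hs hsub hle
    unfold pvBSet
    by_cases h : pvNewNodes dag goal s = []
    · rw [if_pos h]; exact h
    · rw [if_neg h, pv_bset_union_append]
      have hdisj : List.Disjoint s (pvNewNodes dag goal s) :=
        fun {x} hxs hxn => pv_new_disj x hxn hxs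
      have hs' : (s ++ pvNewNodes dag goal s).Nodup :=
        List.Nodup.append hs pv_new_nodup hdisj
      have hsub' : (s ++ pvNewNodes dag goal s) ⊆ pvKeys dag := by
        intro x hx
        rcases List.mem_append.mp hx with h1 | h2
        · exact hsub h1
        · exact pv_new_sub_keys x h2
      have hpos : 0 < (pvNewNodes dag goal s).length := List.length_pos_iff.mpr h
      apply ih _ hs' hsub'
      rw [List.length_append]
      omega

lemma pv_bset_complete {dag goal} {R : PySem.Set String}
    (hclosed : pvNewNodes dag goal R = []) :
    ∀ k, pvReach dag goal k → k ∈ R := by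
  intro k hk
  induction hk with
  | direct k ch h hg =>
    by_contra hkR
    have : k ∈ pvNewNodes dag goal R :=
      pv_mem_newNodes.mpr ⟨ch, pv_get?_mem h, hkR, Or.inl hg⟩
    rw [hclosed] at this
    exact absurd this (List.not_mem_nil)
  | step k ch c h hc hr ih =>
    by_contra hkR
    have : k ∈ pvNewNodes dag goal R :=
      pv_mem_newNodes.mpr ⟨ch, pv_get?_mem h, hkR, Or.inr ⟨c, hc, ih⟩⟩
    rw [hclosed] at this
    exact absurd this (List.not_mem_nil)

-- ---------- assembling the count ----------

lemma pv_top_fold {dag : List (String × List (String × Int))} {goal : String}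
    (hpre : Pre_find_num_parents dag goal) {R : PySem.Set String}
    (hR : ∀ k, k ∈ R ↔ pvReach dag goal k) :
    ∀ (l : List (String × List (String × Int))), (∀ p ∈ l, p ∈ dag) →
    ∀ (memo : PySem.Dict String Bool) (n : Int), pvInv dag goal memo →
      ∃ m', l.foldl (pvTopStep dag goal) (some (memo, n)) =
        some (m', n + (l.countP (fun p => decide (p.1 ∈ R)) : Int)) := by
  intro l
  induction l with
  | nil => exact fun _ memo n _ => ⟨memo, by simp⟩
  | cons p l ih =>
    intro hl memo n hinv
    have hpk : p.1 ∈ pvKeys dag := List.mem_map.mpr ⟨p, hl p List.mem_cons_self, rfl⟩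
    have hmeas : ((pvEKeys dag goal).filter (fun x => !decide (x ∈ ([] : List String)))).length
        < dag.length + 1 := by
      have h1 : ((pvEKeys dag goal).filter (fun x => !decide (x ∈ ([] : List String)))).length
          ≤ (pvEKeys dag goal).length := List.length_filter_le _ _
      have h2 : (pvEKeys dag goal).length ≤ dag.length := by
        unfold pvEKeys
        rw [List.length_map]
        exact List.length_filter_le _ _
      omega
    obtain ⟨out, hout⟩ := pv_findNode_total hpre (dag.length + 1) [] hmeas memo p.1 hpk
      (by intro q hq; exact absurd hq (List.not_mem_nil))
    obtain ⟨hinv', hiff⟩ := pv_findNode_sound (dag.length + 1) memo p.1 out hinv hout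
    have hb : out.2 = decide (p.1 ∈ R) := by
      by_cases hmem : p.1 ∈ R
      · simp [hmem, hiff.mpr ((hR p.1).mp hmem)]
      · cases hbv : out.2 with
        | false => simp [hmem]
        | true => exact absurd ((hR p.1).mpr (hiff.mp hbv)) hmem
    obtain ⟨m', hrest⟩ := ih (fun q hq => hl q (List.mem_cons_of_mem _ hq)) out.1
      (if out.2 then n + 1 else n) hinv'
    refine ⟨m', ?_⟩
    rw [List.foldl_cons]
    have hstep : pvTopStep dag goal (some (memo, n)) p = some (out.1, if out.2 then n + 1 else n) := by
      simp [pvTopStep, hout]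
    rw [hstep, hrest]
    simp only [List.countP_cons, hb]
    by_cases h : p.1 ∈ R
    · simp only [h, decide_true, if_true]
      push_cast
      ring_nf
    · simp only [h, decide_false, Bool.false_eq_true, if_false]
      push_cast
      ring_nf

-- ===== VERDICT (by name: the statement is the Claim_ definition above) =====
theorem find_num_parents_spec : Claim_equal_find_num_parents := by
  intro dag goal _ hpre
  unfold Spec_find_num_parents
  obtain ⟨hn, hclo, hac⟩ := hpre
  -- the fixpoint set computed by B
  set R := pvBSet dag goal (dag.length + 1) PySem.Set.empty with hRdef
  have hprops := pv_bset_props (goal := goal) hn (dag.length + 1) []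
    List.nodup_nil (by intro x hx; exact absurd hx (List.not_mem_nil))
    (by intro x hx; exact absurd hx (List.not_mem_nil))
  have hfix : pvNewNodes dag goal R = [] := by
    apply pv_bset_fix (dag.length + 1) [] List.nodup_nil
      (by intro x hx; exact absurd hx (List.not_mem_nil))
    simp
  have hRiff : ∀ k, k ∈ R ↔ pvReach dag goal k := by
    intro k
    exact ⟨fun hk => hprops.2.2.2 k hk, fun hk => pv_bset_complete hfix k hk⟩
  have hempty : pvInv dag goal PySem.Dict.empty := by
    intro x b hx
    rw [PySem.Dict.get?_empty] at hx
    exact absurd hx (by simp)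
  obtain ⟨m', hfold⟩ := pv_top_fold ⟨hn, hclo, hac⟩ hRiff dag (fun p hp => hp)
    PySem.Dict.empty 0 hempty
  -- value of A
  unfold find_num_parents
  rw [hfold]
  -- value of B
  unfold find_num_parents_alt
  rw [pv_loopB_eq_bset]
  -- both are the size of R
  have hcount : dag.countP (fun p => decide (p.1 ∈ R)) = R.length := by
    have h1 : dag.countP (fun p => decide (p.1 ∈ R))
        = (pvKeys dag).countP (fun k => decide (k ∈ R)) := by
      unfold pvKeys
      rw [List.countP_map]
      rfl
    have h2 : (pvKeys dag).countP (fun k => decide (k ∈ R))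
        = ((pvKeys dag).filter (fun k => decide (k ∈ R))).length :=
      List.countP_eq_length_filter
    have h3 : ((pvKeys dag).filter (fun k => decide (k ∈ R))).Perm R := by
      apply (List.perm_ext_iff_of_nodup (hn.filter _) hprops.1).mpr
      intro a
      simp only [List.mem_filter, decide_eq_true_eq]
      constructor
      · exact fun h => h.2
      · intro h
        exact ⟨pv_reach_mem_keys ((hRiff a).mp h), h⟩
    rw [h1, h2, h3.length_eq]
  simp only [hcount]
  rw [← hRdef]
  omega
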